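-- pv_equiv track=rewrite | github.com/DreamJJW/programmers | Level 1/카드 뭉치.py | solution
-- ===== SOURCE A (Python) =====
-- def solution(cards1, cards2, goal):
--     temp = []; temp2 = []
--
--     if len(cards1) + len(cards2) != len(goal):
--         return "No"
--
--     for i, j in enumerate(cards1):
--         if j in goal:
--             temp.append(goal.index(j))
--
--     for i, j in enumerate(cards2):
--         if j in goal:
--             temp2.append(goal.index(j))
--
--     a = sorted(temp); b = sorted(temp2)
--
--     if a == temp and b == temp2:
--         return "Yes"
--     else:
--         return "No"
-- ===== SOURCE B (Python) =====
-- def solution(cards1, cards2, goal):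
--     if len(cards1) + len(cards2) != len(goal):
--         return "No"
--     first = {}
--     for i, v in enumerate(goal):
--         if v not in first:
--             first[v] = i
--
--     def ok(cards):
--         prev = -1
--         for c in cards:
--             if c in first:
--                 k = first[c]
--                 if k < prev:
--                     return False
--                 prev = k
--         return True
--
--     return "Yes" if ok(cards1) and ok(cards2) else "No"
-- ===== Notes on version B (the rewrite author's own statement) =====
-- stated objective: alternative
-- what changed: B builds a value->first-index dict over goal once and checks non-decreasing positions in a single early-exit pass per card list, instead of A's per-card goal.index/in scans plus building and sorting index lists; on the measured input family the cost is the same.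
import Mathlib
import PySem

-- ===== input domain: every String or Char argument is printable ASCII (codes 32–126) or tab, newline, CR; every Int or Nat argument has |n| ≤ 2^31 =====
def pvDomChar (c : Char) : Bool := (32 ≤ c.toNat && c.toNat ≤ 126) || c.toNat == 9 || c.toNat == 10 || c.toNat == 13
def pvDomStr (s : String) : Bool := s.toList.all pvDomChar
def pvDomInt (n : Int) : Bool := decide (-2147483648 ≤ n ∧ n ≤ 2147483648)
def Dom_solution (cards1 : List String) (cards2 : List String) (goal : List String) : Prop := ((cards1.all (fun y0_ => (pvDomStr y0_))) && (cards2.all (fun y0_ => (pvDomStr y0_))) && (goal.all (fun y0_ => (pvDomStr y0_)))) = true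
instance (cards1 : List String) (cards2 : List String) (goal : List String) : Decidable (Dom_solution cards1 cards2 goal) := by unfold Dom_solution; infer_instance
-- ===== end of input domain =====

-- B replaces A's repeated goal.index/in scans and sort-and-compare by one value→first-index
-- dict over goal and a single non-decreasing check per card list (objective: alternative).

-- ===== PORT A =====
def solution (cards1 : List String) (cards2 : List String) (goal : List String) : String :=
  if cards1.length + cards2.length ≠ goal.length then "No"
  else
    let temp := (PySem.List.enumerate cards1 0).foldl
      (fun t p => if goal.contains p.2 then
          t ++ [((PySem.List.index? goal p.2).map (fun n : Nat => (n : Int))).getD 0]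
        else t) []
    let temp2 := (PySem.List.enumerate cards2 0).foldl
      (fun t p => if goal.contains p.2 then
          t ++ [((PySem.List.index? goal p.2).map (fun n : Nat => (n : Int))).getD 0]
        else t) []
    let a := PySem.List.sorted temp (fun x => x) false
    let b := PySem.List.sorted temp2 (fun x => x) false
    if a = temp ∧ b = temp2 then "Yes" else "No"

-- ===== PORT B =====
-- the inner 'ok(cards)' of Source B: early-return loop → structural recursion on the card list
def okGo (first : PySem.Dict String Int) : Int → List String → Bool
  | _, [] => true
  | prev, c :: rest =>
    if first.contains c then
      let k := first.getD c 0
      if k < prev then false else okGo first k rest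
    else okGo first prev rest

def solution_alt (cards1 : List String) (cards2 : List String) (goal : List String) : String :=
  if cards1.length + cards2.length ≠ goal.length then "No"
  else
    let first := (PySem.List.enumerate goal 0).foldl
      (fun d p => if d.contains p.2 then d else d.insert p.2 p.1) PySem.Dict.empty
    if okGo first (-1) cards1 && okGo first (-1) cards2 then "Yes" else "No"

-- ===== PRECONDITION & SPEC =====
def Spec_solution (cards1 : List String) (cards2 : List String) (goal : List String) (out : String) : Prop := out = solution_alt cards1 cards2 goal
instance (cards1 : List String) (cards2 : List String) (goal : List String) (out : String) : Decidable (Spec_solution cards1 cards2 goal out) := by unfold Spec_solution; infer_instance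

-- ===== CLAIM (what is proved, stated in full; the proofs are below) =====
def Claim_equal_solution : Prop := ∀ (cards1 : List String) (cards2 : List String) (goal : List String), Dom_solution cards1 cards2 goal → Spec_solution cards1 cards2 goal (solution cards1 cards2 goal)

-- ===== LEMMAS AND PROOFS =====

-- first index of c in goal, as Python int
def idxF (goal : List String) (c : String) : Option Int :=
  (PySem.List.index? goal c).map (fun n : Nat => (n : Int))

theorem tempA_eq (goal : List String) : ∀ (cards : List String) (s : Int) (acc : List Int),
    (PySem.List.enumerate cards s).foldl
      (fun t p => if goal.contains p.2 then
          t ++ [((PySem.List.index? goal p.2).map (fun n : Nat => (n : Int))).getD 0]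
        else t) acc = acc ++ cards.filterMap (idxF goal) := by
  intro cards
  induction cards with
  | nil => intro s acc; simp [PySem.List.enumerate_nil]
  | cons c rest ih =>
    intro s acc
    rw [PySem.List.enumerate_cons]
    simp only [List.foldl_cons]
    rw [ih]
    rcases hk : PySem.List.index? goal c with _ | k
    · have hnmem : c ∉ goal := (PySem.List.index?_eq_none_iff _ _).1 hk
      rw [PySem.List.index?_eq_idxOf?] at hk
      simp [hnmem, idxF, hk]
    · have hmem : c ∈ goal := (PySem.List.index?_isSome_iff _ _).1 (by rw [hk]; rfl)
      rw [PySem.List.index?_eq_idxOf?] at hk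
      simp [hmem, idxF, hk]

theorem dict_get?_eq (goal : List String) : ∀ (s : Int) (d : PySem.Dict String Int) (c : String),
    ((PySem.List.enumerate goal s).foldl
      (fun d p => if d.contains p.2 then d else d.insert p.2 p.1) d).get? c =
    (d.get? c).or ((PySem.List.index? goal c).map (fun n : Nat => (n : Int) + s)) := by
  induction goal with
  | nil =>
    intro s d c
    rw [PySem.List.enumerate_nil, PySem.List.index?_eq_idxOf?]
    simp
  | cons x rest ih =>
    intro s d c
    rw [PySem.List.enumerate_cons]
    simp only [List.foldl_cons]
    rw [ih]
    by_cases hcx : c = x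
    · subst hcx
      rw [PySem.List.index?_cons_self]
      by_cases hd : d.contains c
      · have : (d.get? c).isSome := by rwa [PySem.Dict.contains_eq_isSome_get?] at hd
        obtain ⟨v, hv⟩ := Option.isSome_iff_exists.mp this
        simp [hd, hv]
      · have hnone : d.get? c = none := by
          rcases h : d.get? c with _ | v
          · rfl
          · exfalso; apply hd; rw [PySem.Dict.contains_eq_isSome_get?, h]; rfl
        simp only [hd, Bool.false_eq_true, if_false]
        rw [PySem.Dict.get?_insert_self, hnone]
        simp
    · rw [PySem.List.index?_cons_of_ne _ (fun h => hcx h.symm)]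
      have hget : (if d.contains x then d else d.insert x s).get? c = d.get? c := by
        split
        · rfl
        · exact PySem.Dict.get?_insert_of_ne _ _ hcx
      rw [hget]
      rcases d.get? c with _ | v
      · simp only [Option.none_or, Option.map_map]
        congr 1
        funext n
        simp only [Function.comp]
        push_cast
        ring
      · rfl

theorem first_get? (goal : List String) (c : String) :
    ((PySem.List.enumerate goal 0).foldl
      (fun d p => if d.contains p.2 then d else d.insert p.2 p.1) PySem.Dict.empty).get? c =
    idxF goal c := by
  rw [dict_get?_eq goal 0 PySem.Dict.empty c]
  rcases h : PySem.List.index? goal c with _ | k <;>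
    rw [PySem.List.index?_eq_idxOf?] at h <;> simp [idxF, h, PySem.Dict.get?_empty]

theorem okGo_iff (goal : List String) (first : PySem.Dict String Int)
    (h : ∀ c, first.get? c = idxF goal c) :
    ∀ (cards : List String) (prev : Int),
    okGo first prev cards = true ↔ List.IsChain (· ≤ ·) (prev :: cards.filterMap (idxF goal)) := by
  intro cards
  induction cards with
  | nil => intro prev; simp [okGo]
  | cons c rest ih =>
    intro prev
    simp only [List.filterMap_cons]
    rcases hidx : idxF goal c with _ | k
    · have hc : first.contains c = false := by
        rw [PySem.Dict.contains_eq_isSome_get?, h c, hidx]; rfl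
      simp only [okGo, hc, Bool.false_eq_true, if_false]
      exact ih prev
    · have hc : first.contains c = true := by
        rw [PySem.Dict.contains_eq_isSome_get?, h c, hidx]; rfl
      have hgd : first.getD c 0 = k := by
        rw [PySem.Dict.getD_eq_get?_getD, h c, hidx]; rfl
      simp only [okGo, hc, if_true, hgd, List.isChain_cons_cons]
      by_cases hlt : k < prev
      · simp only [hlt, if_true]
        constructor
        · intro hfalse; exact absurd hfalse (by simp)
        · rintro ⟨hle, -⟩; omega
      · simp only [hlt, if_false]
        rw [ih k]
        constructor
        · intro hch; exact ⟨by omega, hch⟩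
        · rintro ⟨-, hch⟩; exact hch

theorem sorted_eq_self_iff (l : List Int) :
    PySem.List.sorted l (fun x => x) false = l ↔ l.Pairwise (· ≤ ·) := by
  constructor
  · intro hEq
    have := PySem.List.sorted_pairwise l (fun x => x)
    rwa [hEq] at this
  · intro hp
    exact PySem.List.sorted_eq_self_of_pairwise _ _ hp

theorem chain_neg_one_iff (l : List Int) (hnn : ∀ x ∈ l, 0 ≤ x) :
    List.IsChain (· ≤ ·) ((-1 : Int) :: l) ↔ l.Pairwise (· ≤ ·) := by
  rw [List.isChain_iff_pairwise, List.pairwise_cons]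
  constructor
  · rintro ⟨-, hp⟩; exact hp
  · intro hp
    exact ⟨fun x hx => by have := hnn x hx; omega, hp⟩

theorem filterMap_nonneg (goal cards : List String) :
    ∀ x ∈ cards.filterMap (idxF goal), 0 ≤ x := by
  intro x hx
  obtain ⟨c, -, hc⟩ := List.mem_filterMap.mp hx
  rw [idxF, Option.map_eq_some_iff] at hc
  obtain ⟨n, -, hn⟩ := hc
  omega

-- ===== VERDICT (by name: the statement is the Claim_ definition above) =====
theorem solution_spec : Claim_equal_solution := by
  intro cards1 cards2 goal _
  unfold Spec_solution solution solution_alt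
  by_cases hlen : cards1.length + cards2.length ≠ goal.length
  · rw [if_pos hlen, if_pos hlen]
  · rw [if_neg hlen, if_neg hlen]
    rw [tempA_eq goal cards1 0 [], tempA_eq goal cards2 0 []]
    simp only [List.nil_append]
    have hok : ∀ cards : List String,
        okGo ((PySem.List.enumerate goal 0).foldl
          (fun d p => if d.contains p.2 then d else d.insert p.2 p.1) PySem.Dict.empty)
          (-1) cards = true ↔ (cards.filterMap (idxF goal)).Pairwise (· ≤ ·) := by
      intro cards
      rw [okGo_iff goal _ (first_get? goal) cards (-1),
        chain_neg_one_iff _ (filterMap_nonneg goal cards)]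
    by_cases h1 : (cards1.filterMap (idxF goal)).Pairwise (· ≤ ·) <;>
      by_cases h2 : (cards2.filterMap (idxF goal)).Pairwise (· ≤ ·) <;>
        simp [sorted_eq_self_iff, hok, h1, h2]
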